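-- pv_equiv track=rewrite | github.com/nrbennet/dl_binder_design | include/silent_tools/silent_tools.py | chain_ids_to_silent_format
-- ===== SOURCE A (Python) =====
-- def chain_ids_to_silent_format(chain_ids):
--     parts = []
--     cur_letter = None
--     cur_start = None
--     for i, letter in enumerate(chain_ids + "\n"): # chain id can never be \n
--         if ( letter != cur_letter ):
--             if ( cur_letter != None):
--                 parts.append("%s:%i-%i"%(cur_letter, cur_start+1, i))
--             cur_letter = letter
--             cur_start = i
--     return " ".join(parts)
-- ===== SOURCE B (Python) =====
-- def chain_ids_to_silent_format(chain_ids):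
--     # Two-index run scanner: find each maximal run [i, j) directly, no sentinel
--     # character and no previous-letter state machine.
--     parts = []
--     i = 0
--     n = len(chain_ids)
--     while i < n:
--         letter = chain_ids[i]
--         j = i + 1
--         while j < n and chain_ids[j] == letter:
--             j += 1
--         parts.append("%s:%i-%i" % (letter, i + 1, j))
--         i = j
--     return " ".join(parts)
-- ===== Notes on version B (the rewrite author's own statement) =====
-- stated objective: simpler
-- what changed: Replaces A's sentinel-newline + previous-letter state machine with a direct two-index scan that finds each maximal run [i, j) and emits its range immediately; Pre_ excludes strings ending in '\n' (never a chain id), where A's appended sentinel merges with the trailing newline run and drops it while B emits it.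
-- outside the precondition, e.g. on chain_ids_to_silent_format('A\n'): A returns 'A:1-1', B returns 'A:1-1 \n:2-2'; on chain_ids_to_silent_format('\n'): A returns '', B returns '\n:1-1'
import Mathlib
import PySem

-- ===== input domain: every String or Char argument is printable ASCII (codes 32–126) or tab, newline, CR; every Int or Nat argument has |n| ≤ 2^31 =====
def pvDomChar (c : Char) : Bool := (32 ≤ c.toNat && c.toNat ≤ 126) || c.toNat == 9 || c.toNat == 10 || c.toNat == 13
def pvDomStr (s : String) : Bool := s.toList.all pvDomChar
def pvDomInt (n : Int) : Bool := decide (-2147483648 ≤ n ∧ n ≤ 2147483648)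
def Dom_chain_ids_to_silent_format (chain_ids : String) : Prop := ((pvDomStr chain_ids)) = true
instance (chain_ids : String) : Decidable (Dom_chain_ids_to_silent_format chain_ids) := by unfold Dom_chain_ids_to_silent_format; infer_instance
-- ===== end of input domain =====

-- B replaces A's sentinel-newline/previous-letter state machine with a direct maximal-run
-- scan (simpler decomposition, same O(n) cost); equivalence is claimed on strings not
-- ending in '\n', which real chain-id strings never do.

-- "%s:%i-%i" % (c, a, b)   (shared formatting helper; both Pythons build this string)
def pvFmt (c : Char) (a b : Int) : String :=
  String.mk [c] ++ ":" ++ PySem.Int.toStr a ++ "-" ++ PySem.Int.toStr b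

-- ===== PORT A =====
-- loop body of A; state = (parts, cur_letter, cur_start); cur_start is `some` whenever
-- cur_letter is (both are set together), so `.getD 0` is never actually consulted
def pvStepA (st : List String × Option Char × Option Int) (p : Int × Char) :
    List String × Option Char × Option Int :=
  let parts := st.1
  let curLetter := st.2.1
  let curStart := st.2.2
  let i := p.1
  let letter := p.2
  if some letter ≠ curLetter then
    let parts :=
      match curLetter with
      | some c => parts ++ [pvFmt c (curStart.getD 0 + 1) i]
      | none => parts
    (parts, some letter, some i)
  else st

def chain_ids_to_silent_format (chain_ids : String) : String :=
  -- for i, letter in enumerate(chain_ids + "\n")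
  let res := (PySem.List.enumerate (chain_ids.toList ++ ['\n']) 0).foldl pvStepA ([], none, none)
  PySem.Str.join " " res.1

-- ===== PORT B =====
-- length of the maximal leading run of `c` (B's inner `while j < n and chain_ids[j] == letter`)
def pvRunLen (c : Char) : List Char → Nat
  | [] => 0
  | x :: xs => if x = c then pvRunLen c xs + 1 else 0

-- B's outer while loop: recursion on the unscanned suffix, `i` chars already consumed
def pvRuns : List Char → Int → List String
  | [], _ => []
  | c :: xs, i =>
    let k := pvRunLen c xs
    pvFmt c (i + 1) (i + 1 + (k : Int)) :: pvRuns (xs.drop k) (i + 1 + (k : Int))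
termination_by l => l.length
decreasing_by
  simp only [List.length_cons]
  have := List.length_drop (l := xs) (i := pvRunLen c xs)
  omega

def chain_ids_to_silent_format_alt (chain_ids : String) : String :=
  PySem.Str.join " " (pvRuns chain_ids.toList 0)

-- ===== PRECONDITION & SPEC =====
-- Pre_ excludes only strings ending in '\n' (never a chain id), where A's appended sentinel
-- newline merges with the trailing newline run and that last run is not emitted, while B
-- emits it; both readings of that unspecified corner are defensible.
def Pre_chain_ids_to_silent_format (chain_ids : String) : Prop :=
  chain_ids.toList.getLast? ≠ some '\n'
instance (chain_ids : String) : Decidable (Pre_chain_ids_to_silent_format chain_ids) := by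
  unfold Pre_chain_ids_to_silent_format; infer_instance

def pvWitness_chain_ids_to_silent_format : String := "AABBBA"

def Spec_chain_ids_to_silent_format (chain_ids : String) (out : String) : Prop :=
  out = chain_ids_to_silent_format_alt chain_ids
instance (chain_ids : String) (out : String) :
    Decidable (Spec_chain_ids_to_silent_format chain_ids out) := by
  unfold Spec_chain_ids_to_silent_format; infer_instance

-- ===== CLAIM (what is proved, stated in full; the proofs are below) =====
def Claim_equal_chain_ids_to_silent_format : Prop :=
  ∀ (chain_ids : String), Dom_chain_ids_to_silent_format chain_ids →
    Pre_chain_ids_to_silent_format chain_ids →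
    Spec_chain_ids_to_silent_format chain_ids (chain_ids_to_silent_format chain_ids)

-- ===== LEMMAS AND PROOFS =====

theorem pvRunLen_take (c : Char) : ∀ xs : List Char,
    xs.take (pvRunLen c xs) = List.replicate (pvRunLen c xs) c := by
  intro xs
  induction xs with
  | nil => simp [pvRunLen]
  | cons x xs ih =>
    by_cases h : x = c
    · simp [pvRunLen, h, List.replicate_succ, ih]
    · simp [pvRunLen, h]

theorem pvRunLen_drop_head (c : Char) : ∀ xs : List Char,
    (xs.drop (pvRunLen c xs)).head? ≠ some c := by
  intro xs
  induction xs with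
  | nil => simp [pvRunLen]
  | cons x xs ih =>
    by_cases h : x = c
    · simpa [pvRunLen, h] using ih
    · simp only [pvRunLen, if_neg h, List.drop_zero, List.head?_cons, ne_eq,
        Option.some.injEq]
      exact fun hx => h hx

theorem getLast?_cons_append_rep (d : Char) (rest : List Char) :
    ∀ k : Nat, (d :: (List.replicate k d ++ rest)).getLast? = (d :: rest).getLast? := by
  intro k
  induction k with
  | zero => simp
  | succ k ih =>
    rw [List.replicate_succ, List.cons_append, List.getLast?_cons_cons]
    exact ih

-- processing a run of chars equal to the current letter leaves the state unchanged
theorem foldl_stepA_run (c : Char) : ∀ (k : Nat) (xs : List Char) (i : Int)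
    (parts : List String) (s : Option Int),
    (PySem.List.enumerate (List.replicate k c ++ xs) i).foldl pvStepA (parts, some c, s)
      = (PySem.List.enumerate xs (i + k)).foldl pvStepA (parts, some c, s) := by
  intro k
  induction k with
  | zero => intro xs i parts s; simp
  | succ k ih =>
    intro xs i parts s
    rw [List.replicate_succ, List.cons_append, PySem.List.enumerate_cons]
    simp only [List.foldl_cons]
    have hstep : pvStepA (parts, some c, s) (i, c) = (parts, some c, s) := by
      simp [pvStepA]
    rw [hstep, ih]
    congr 1
    push_cast
    ring_nf

-- main invariant for A's fold: from state (parts, some c, some s) at index i,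
-- processing l ++ ['\n'] appends exactly the range of c's run and then B's runs of l
theorem foldl_stepA_main_aux : ∀ (n : Nat) (l : List Char) (c : Char) (i : Int)
    (parts : List String) (s : Int), l.length ≤ n →
    l.head? ≠ some c → (c :: l).getLast? ≠ some '\n' →
    ((PySem.List.enumerate (l ++ ['\n']) i).foldl pvStepA (parts, some c, some s)).1
      = parts ++ pvFmt c (s + 1) i :: pvRuns l i := by
  intro n
  induction n with
  | zero =>
    intro l c i parts s hn hhead hlast
    have hl0 : l = [] := List.eq_nil_of_length_eq_zero (Nat.le_zero.mp hn)
    subst hl0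
    have hc : c ≠ '\n' := by simpa using hlast
    simp [PySem.List.enumerate_cons, pvStepA, Ne.symm hc, pvRuns]
  | succ n ih =>
    intro l c i parts s hn hhead hlast
    match l with
    | [] =>
      have hc : c ≠ '\n' := by simpa using hlast
      simp [PySem.List.enumerate_cons, pvStepA, Ne.symm hc, pvRuns]
    | d :: xs =>
      have hdc : d ≠ c := by simpa using hhead
      set k := pvRunLen d xs with hk
      have hxs : xs = List.replicate k d ++ xs.drop k := by
        conv_lhs => rw [← List.take_append_drop k xs, pvRunLen_take]
      rw [List.cons_append, PySem.List.enumerate_cons]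
      simp only [List.foldl_cons]
      have hstep : pvStepA (parts, some c, some s) (i, d)
          = (parts ++ [pvFmt c (s + 1) i], some d, some i) := by
        simp [pvStepA, hdc]
      rw [hstep]
      conv_lhs => rw [hxs]
      rw [List.append_assoc, foldl_stepA_run]
      have hlen : (xs.drop k).length ≤ n := by
        have := List.length_drop (l := xs) (i := k)
        simp only [List.length_cons] at hn
        omega
      have hh : (xs.drop k).head? ≠ some d := pvRunLen_drop_head d xs
      have hl : (d :: xs.drop k).getLast? ≠ some '\n' := by
        have h1 : (c :: d :: xs).getLast? = (d :: xs).getLast? := List.getLast?_cons_cons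
        have h2 : (d :: xs).getLast? = (d :: xs.drop k).getLast? := by
          conv_lhs => rw [hxs]
          exact getLast?_cons_append_rep d (xs.drop k) k
        rw [h1, h2] at hlast
        exact hlast
      rw [ih (xs.drop k) d (i + 1 + (k : Int)) (parts ++ [pvFmt c (s + 1) i]) i hlen hh hl]
      show _ = parts ++ pvFmt c (s + 1) i :: pvRuns (d :: xs) i
      rw [pvRuns]
      simp [← hk]

-- ===== VERDICT (by name: the statement is the Claim_ definition above) =====
theorem chain_ids_to_silent_format_spec : Claim_equal_chain_ids_to_silent_format := by
  intro chain_ids _hdom hpre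
  unfold Spec_chain_ids_to_silent_format
  unfold chain_ids_to_silent_format chain_ids_to_silent_format_alt
  match hcl : chain_ids.toList with
  | [] => simp [PySem.List.enumerate_cons, pvStepA, pvRuns]
  | d :: xs =>
    unfold Pre_chain_ids_to_silent_format at hpre
    rw [hcl] at hpre
    set k := pvRunLen d xs with hk
    have hxs : xs = List.replicate k d ++ xs.drop k := by
      conv_lhs => rw [← List.take_append_drop k xs, pvRunLen_take]
    rw [List.cons_append, PySem.List.enumerate_cons]
    simp only [List.foldl_cons]
    have hstep : pvStepA ([], none, none) ((0 : Int), d) = ([], some d, some 0) := by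
      simp [pvStepA]
    rw [hstep]
    conv_lhs => rw [hxs]
    rw [List.append_assoc, foldl_stepA_run]
    have hh : (xs.drop k).head? ≠ some d := pvRunLen_drop_head d xs
    have hl : (d :: xs.drop k).getLast? ≠ some '\n' := by
      have h2 : (d :: xs).getLast? = (d :: xs.drop k).getLast? := by
        conv_lhs => rw [hxs]
        exact getLast?_cons_append_rep d (xs.drop k) k
      rw [h2] at hpre
      exact hpre
    rw [foldl_stepA_main_aux (xs.drop k).length (xs.drop k) d ((0:Int) + 1 + (k : Int)) [] 0 le_rfl hh hl]
    rw [pvRuns]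
    simp [← hk]
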